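-- pv_equiv track=rewrite | github.com/surmayi/GrokkingCoding | ModifiedBinarySearch.py | search_next_letter
-- ===== SOURCE A (Python) =====
-- def search_next_letter(arr, key):
--     low,high= 0, len(arr)-1
--     while low<=high:
--         mid = low + (high-low)//2
--         if arr[mid]<=key:
--             low=mid+1
--         else:
--             high=mid-1
--     return arr[low%len(arr)]
-- ===== SOURCE B (Python) =====
-- def search_next_letter(arr, key):
--     # recursion on slices instead of index pointers; same cyclic wrap via % len(arr)
--     def first_greater(seg, base):
--         if not seg:
--             return base
--         mid = (len(seg) - 1) // 2
--         if seg[mid] <= key: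
--             return first_greater(seg[mid + 1:], base + mid + 1)
--         return first_greater(seg[:mid], base)
--     return arr[first_greater(arr, 0) % len(arr)]
-- ===== Notes on version B (the rewrite author's own statement) =====
-- stated objective: alternative
-- what changed: Replaces the iterative low/high index-pointer loop by a recursion on list slices carrying a base offset (same halving decisions, so it agrees with A even on unsorted input).
import Mathlib
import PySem

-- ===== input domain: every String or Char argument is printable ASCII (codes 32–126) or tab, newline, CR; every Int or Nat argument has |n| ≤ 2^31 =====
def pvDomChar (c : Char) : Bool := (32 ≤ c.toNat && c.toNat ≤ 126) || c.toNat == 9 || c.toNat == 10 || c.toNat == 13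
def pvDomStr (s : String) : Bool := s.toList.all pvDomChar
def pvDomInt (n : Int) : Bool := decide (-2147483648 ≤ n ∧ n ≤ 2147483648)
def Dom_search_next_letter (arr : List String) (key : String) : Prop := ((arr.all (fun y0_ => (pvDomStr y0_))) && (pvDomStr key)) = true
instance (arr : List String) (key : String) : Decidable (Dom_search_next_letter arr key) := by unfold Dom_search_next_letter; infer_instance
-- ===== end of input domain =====

-- B: recursion on list slices carrying a base offset instead of A's low/high index-pointer loop; same halving decisions, same cyclic wrap.

-- ===== PORT A =====
-- the while low<=high loop; fuel (arr.length + 1 at the call, enough for the shrinking interval) and pyGetD's "" default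
-- are totality guards only (mid stays in range on A's initial bounds)
def searchLoop (arr : List String) (key : String) : Nat → Int → Int → Int
  | 0, low, _ => low
  | fuel + 1, low, high =>
    if low ≤ high then
      let mid := low + PySem.Int.floordiv (high - low) 2
      if PySem.List.pyGetD arr mid "" ≤ key then
        searchLoop arr key fuel (mid + 1) high
      else
        searchLoop arr key fuel low (mid - 1)
    else low

def search_next_letter (arr : List String) (key : String) : String :=
  let low := searchLoop arr key (arr.length + 1) 0 ((arr.length : Int) - 1)
  -- arr[low % len(arr)]; "" default is unreachable under Pre_ (arr ≠ [])
  PySem.List.pyGetD arr (PySem.Int.mod low (arr.length : Int)) ""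

-- ===== PORT B =====
-- Source B's first_greater: recursion on slices with a base offset; fuel (arr.length + 1 at the call) is a totality guard only
def firstGreater (key : String) : Nat → List String → Int → Int
  | 0, _, base => base
  | fuel + 1, seg, base =>
    if seg.isEmpty then base
    else
      let mid := PySem.Int.floordiv ((seg.length : Int) - 1) 2
      if PySem.List.pyGetD seg mid "" ≤ key then
        firstGreater key fuel (PySem.List.slice seg (some (mid + 1)) none) (base + mid + 1)
      else
        firstGreater key fuel (PySem.List.slice seg none (some mid)) base

def search_next_letter_alt (arr : List String) (key : String) : String :=
  let idx := firstGreater key (arr.length + 1) arr 0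
  PySem.List.pyGetD arr (PySem.Int.mod idx (arr.length : Int)) ""

-- ===== PRECONDITION & SPEC =====
-- Pre_ excludes only the empty list, on which A raises ZeroDivisionError (0 % 0); B raises there too.
def Pre_search_next_letter (arr : List String) (key : String) : Prop := arr ≠ []
instance (arr : List String) (key : String) : Decidable (Pre_search_next_letter arr key) := by unfold Pre_search_next_letter; infer_instance
def pvWitness_search_next_letter : List String × String := (["a", "c", "f"], "b")
def Spec_search_next_letter (arr : List String) (key : String) (out : String) : Prop := out = search_next_letter_alt arr key
instance (arr : List String) (key : String) (out : String) : Decidable (Spec_search_next_letter arr key out) := by unfold Spec_search_next_letter; infer_instance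

-- ===== CLAIM (what is proved, stated in full; the proofs are below) =====
def Claim_equal_search_next_letter : Prop := ∀ (arr : List String) (key : String), Dom_search_next_letter arr key → Pre_search_next_letter arr key → Spec_search_next_letter arr key (search_next_letter arr key)

-- ===== LEMMAS AND PROOFS =====

theorem firstGreater_nil (key : String) (fb : Nat) (base : Int) :
    firstGreater key fb [] base = base := by
  cases fb <;> simp [firstGreater]

-- the invariant: first_greater on the slice arr[low:high+1] with base low equals A's loop from (low, high),
-- for any sufficient fuels
theorem fg_eq_loop (arr : List String) (key : String) :
    ∀ (fa fb : Nat) (low high : Int), 0 ≤ low → low ≤ high + 1 → high < (arr.length : Int) →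
      (high + 1 - low).toNat ≤ fa → (high + 1 - low).toNat ≤ fb →
      firstGreater key fb ((arr.drop low.toNat).take (high + 1 - low).toNat) low
        = searchLoop arr key fa low high := by
  intro fa
  induction fa with
  | zero =>
    intro fb low high h0 h1 h2 hfa hfb
    have ht : (high + 1 - low).toNat = 0 := by omega
    rw [ht]
    simp only [List.take_zero]
    rw [firstGreater_nil, searchLoop]
  | succ fa ih =>
    intro fb low high h0 h1 h2 hfa hfb
    by_cases hle : low ≤ high
    · have hfd := PySem.Int.floordiv_eq_ediv_of_pos (a := high - low) (b := 2) (by norm_num)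
      obtain ⟨fb', rfl⟩ : ∃ fb', fb = fb' + 1 := ⟨fb - 1, by omega⟩
      have hseglen : ((arr.drop low.toNat).take (high + 1 - low).toNat).length
          = (high + 1 - low).toNat := by
        simp only [List.length_take, List.length_drop]
        omega
      rw [firstGreater, searchLoop, if_pos hle]
      have hne : ¬ (((arr.drop low.toNat).take (high + 1 - low).toNat).isEmpty = true) := by
        rw [List.isEmpty_iff_length_eq_zero, hseglen]
        omega
      rw [if_neg hne]
      simp only [hseglen]
      have hmid : PySem.Int.floordiv (((high + 1 - low).toNat : Int) - 1) 2 = (high - low) / 2 := by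
        rw [show (((high + 1 - low).toNat : Int) - 1) = high - low by omega]
        exact PySem.Int.floordiv_eq_ediv_of_pos (by norm_num)
      rw [hmid, hfd]
      have hget : PySem.List.pyGetD ((arr.drop low.toNat).take (high + 1 - low).toNat)
          ((high - low) / 2) "" = PySem.List.pyGetD arr (low + (high - low) / 2) "" := by
        rw [PySem.List.pyGetD_eq_getElem _ _ (by omega) (by rw [hseglen]; omega),
            PySem.List.pyGetD_eq_getElem _ _ (by omega) (by omega),
            List.getElem_take, List.getElem_drop]
        congr 1
        omega
      rw [hget]
      by_cases hc : PySem.List.pyGetD arr (low + (high - low) / 2) "" ≤ key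
      · rw [if_pos hc, if_pos hc,
            PySem.List.slice_from _ (a := (high - low) / 2 + 1) (by omega),
            List.drop_take, List.drop_drop]
        have e1 : low.toNat + ((high - low) / 2 + 1).toNat
            = (low + (high - low) / 2 + 1).toNat := by omega
        have e2 : (high + 1 - low).toNat - ((high - low) / 2 + 1).toNat
            = (high + 1 - (low + (high - low) / 2 + 1)).toNat := by omega
        rw [e1, e2]
        exact ih fb' (low + (high - low) / 2 + 1) high (by omega) (by omega) h2
          (by omega) (by omega)
      · rw [if_neg hc, if_neg hc,
            PySem.List.slice_to _ (b := (high - low) / 2) (by omega),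
            List.take_take]
        have e1 : min ((high - low) / 2).toNat (high + 1 - low).toNat
            = (low + (high - low) / 2 - 1 + 1 - low).toNat := by omega
        rw [e1]
        exact ih fb' low (low + (high - low) / 2 - 1) h0 (by omega) (by omega)
          (by omega) (by omega)
    · have ht : (high + 1 - low).toNat = 0 := by omega
      rw [ht]
      simp only [List.take_zero]
      rw [firstGreater_nil, searchLoop, if_neg hle]

-- ===== VERDICT (by name: the statement is the Claim_ definition above) =====
theorem search_next_letter_spec : Claim_equal_search_next_letter := by
  intro arr key hdom hpre
  unfold Spec_search_next_letter search_next_letter search_next_letter_alt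
  have hlen : 1 ≤ arr.length := by
    cases arr with
    | nil => exact absurd rfl hpre
    | cons a t => simp
  have h := fg_eq_loop arr key (arr.length + 1) (arr.length + 1) 0 ((arr.length : Int) - 1)
    (by omega) (by omega) (by omega) (by omega) (by omega)
  simp only [Int.toNat_zero, List.drop_zero] at h
  rw [show ((arr.length : Int) - 1 + 1 - 0).toNat = arr.length by omega, List.take_length] at h
  rw [h]
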